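-- pv_equiv track=rewrite | github.com/wonyeongdeok/practice_Python | cospro/2/initial_code/1차/1차 2급 1_initial_code.py | solution
-- ===== SOURCE A (Python) =====
-- def solution(shirt_size):
--     size_counter = [0 for _ in range(6)]
--     for size in shirt_size:
--         if size == 'XS':
--             size_counter[0] += 1
--         elif size == 'S':
--             size_counter[1] += 1
--         elif size == 'M':
--             size_counter[2] += 1
--         elif size == 'L':
--             size_counter[3] += 1
--         elif size == 'XL':
--             size_counter[4] += 1
--         elif size == 'XXL':
--             size_counter[5] += 1
--     return size_counter
-- ===== SOURCE B (Python) =====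
-- def solution(shirt_size):
--     return [shirt_size.count(s) for s in ['XS', 'S', 'M', 'L', 'XL', 'XXL']]
-- ===== Notes on version B (the rewrite author's own statement) =====
-- stated objective: idiomatic
-- what changed: Replaces the single-pass if/elif chain updating a mutable counter array with a comprehension over the fixed size order that counts each label via list.count.
import Mathlib
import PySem

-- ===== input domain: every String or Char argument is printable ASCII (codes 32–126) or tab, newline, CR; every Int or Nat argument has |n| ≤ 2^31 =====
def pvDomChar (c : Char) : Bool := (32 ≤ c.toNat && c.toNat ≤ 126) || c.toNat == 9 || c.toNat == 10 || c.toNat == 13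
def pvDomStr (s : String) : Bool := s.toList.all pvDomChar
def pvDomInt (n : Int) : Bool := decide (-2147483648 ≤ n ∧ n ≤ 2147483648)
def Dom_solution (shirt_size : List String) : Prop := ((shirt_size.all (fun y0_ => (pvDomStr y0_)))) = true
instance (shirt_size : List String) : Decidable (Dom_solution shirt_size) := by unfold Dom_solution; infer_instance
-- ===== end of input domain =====

-- B replaces A's single-pass if/elif counter array with a count per fixed-order label (idiomatic, same result).

-- ===== PORT A =====
-- one step of A's for-loop: the if/elif chain incrementing size_counter[i]
def solutionStep (c : List Int) (size : String) : List Int :=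
  if size == "XS" then c.set 0 (c.getD 0 0 + 1)
  else if size == "S" then c.set 1 (c.getD 1 0 + 1)
  else if size == "M" then c.set 2 (c.getD 2 0 + 1)
  else if size == "L" then c.set 3 (c.getD 3 0 + 1)
  else if size == "XL" then c.set 4 (c.getD 4 0 + 1)
  else if size == "XXL" then c.set 5 (c.getD 5 0 + 1)
  else c

def solution (shirt_size : List String) : List Int :=
  shirt_size.foldl solutionStep [0, 0, 0, 0, 0, 0]

-- ===== PORT B =====
def solution_alt (shirt_size : List String) : List Int :=
  (["XS", "S", "M", "L", "XL", "XXL"] : List String).map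
    (fun s => (PySem.List.count shirt_size s : Int))

-- ===== PRECONDITION & SPEC =====
def Spec_solution (shirt_size : List String) (out : List Int) : Prop := out = solution_alt shirt_size
instance (shirt_size : List String) (out : List Int) : Decidable (Spec_solution shirt_size out) := by unfold Spec_solution; infer_instance

-- ===== CLAIM (what is proved, stated in full; the proofs are below) =====
def Claim_equal_solution : Prop := ∀ (shirt_size : List String), Dom_solution shirt_size → Spec_solution shirt_size (solution shirt_size)

-- ===== LEMMAS AND PROOFS =====
theorem solution_fold_inv (xs : List String) (a b c d e f : Int) :
    xs.foldl solutionStep [a, b, c, d, e, f] =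
      [a + xs.count "XS", b + xs.count "S", c + xs.count "M",
       d + xs.count "L", e + xs.count "XL", f + xs.count "XXL"] := by
  induction xs generalizing a b c d e f with
  | nil => simp
  | cons x xs ih =>
    simp only [List.foldl_cons, solutionStep]
    by_cases h1 : x = "XS" <;> by_cases h2 : x = "S" <;> by_cases h3 : x = "M" <;>
      by_cases h4 : x = "L" <;> by_cases h5 : x = "XL" <;> by_cases h6 : x = "XXL" <;>
      simp_all [ih, List.count_cons, List.set, List.getD] <;> ring_nf

-- ===== VERDICT (by name: the statement is the Claim_ definition above) =====
theorem solution_spec : Claim_equal_solution := by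
  intro xs _
  show _ = _
  simp [solution, solution_alt, solution_fold_inv, PySem.List.count_eq]
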